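-- pv_equiv track=rewrite | github.com/likenother23/pdf-financial-processor | process_financials.py | _normalize_fatura
-- ===== SOURCE A (Python) =====
-- def _normalize_fatura(val: str) -> str:
--     """
--     Fix common OCR errors in e-fatura codes.
--     Turkish e-fatura format: 2-5 letter prefix + year (4 digits) + sequence (9 digits)
--     Once the first digit is encountered, any 'O' is almost certainly a misread '0'.
--     """
--     val = val.upper()
--     result = []
--     found_digit = False
--     for ch in val:
--         if ch.isdigit():
--             found_digit = True
--         # After first digit, OCR 'O' = zero
--         result.append('0' if (found_digit and ch == 'O') else ch)
--     return "".join(result)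
-- ===== SOURCE B (Python) =====
-- def _normalize_fatura(val: str) -> str:
--     """
--     Fix common OCR errors in e-fatura codes.
--     Find the first digit; copy the prefix before it unchanged and map
--     'O' -> '0' over the rest in one pass (no running flag).
--     """
--     val = val.upper()
--     i = next((k for k, ch in enumerate(val) if ch.isdigit()), None)
--     if i is None:
--         return val
--     return val[:i] + ''.join('0' if ch == 'O' else ch for ch in val[i:])
-- ===== Notes on version B (the rewrite author's own statement) =====
-- stated objective: simpler
-- what changed: Replaces the running found_digit flag loop by locating the index of the first digit and then bulk-mapping 'O'->'0' over the tail slice only, leaving the prefix untouched.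
import Mathlib
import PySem

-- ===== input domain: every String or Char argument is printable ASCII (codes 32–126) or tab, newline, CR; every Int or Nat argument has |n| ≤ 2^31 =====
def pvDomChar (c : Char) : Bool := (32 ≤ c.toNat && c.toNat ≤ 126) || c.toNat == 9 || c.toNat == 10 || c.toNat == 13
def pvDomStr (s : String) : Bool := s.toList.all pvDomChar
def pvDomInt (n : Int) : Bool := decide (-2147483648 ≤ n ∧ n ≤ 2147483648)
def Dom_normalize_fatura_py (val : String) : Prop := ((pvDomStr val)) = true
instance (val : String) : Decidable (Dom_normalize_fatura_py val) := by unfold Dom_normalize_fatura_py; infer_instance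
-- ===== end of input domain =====

-- B replaces A's running found_digit flag loop by a find-the-first-digit split plus a bulk
-- 'O'->'0' map over the tail; objective: simpler.

-- ===== PORT A =====
-- literal transliteration of A: upper, then one loop carrying (result, found_digit)
def normalize_fatura_py (val : String) : String :=
  let up := PySem.Chars.upper val.toList
  let st := up.foldl (fun (st : List Char × Bool) ch =>
    let found := st.2 || PySem.Chars.isdigit ch
    (st.1 ++ [if found && ch == 'O' then '0' else ch], found)) ([], false)
  String.mk st.1

-- ===== PORT B =====
-- literal transliteration of B: upper, index of first digit; none => unchanged,
-- some i => val[:i] ++ map over val[i:]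
def normalize_fatura_py_alt (val : String) : String :=
  let up := PySem.Chars.upper val.toList
  match up.findIdx? (fun ch => PySem.Chars.isdigit ch) with
  | none => String.mk up
  | some i =>
      String.mk (PySem.List.slice up none (some (i : Int)) ++
        (PySem.List.slice up (some (i : Int)) none).map (fun ch => if ch == 'O' then '0' else ch))

-- ===== PRECONDITION & SPEC =====
def Spec_normalize_fatura_py (val : String) (out : String) : Prop := out = normalize_fatura_py_alt val
instance (val : String) (out : String) : Decidable (Spec_normalize_fatura_py val out) := by unfold Spec_normalize_fatura_py; infer_instance

-- ===== CLAIM (what is proved, stated in full; the proofs are below) =====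
def Claim_equal_normalize_fatura_py : Prop := ∀ (val : String), Dom_normalize_fatura_py val → Spec_normalize_fatura_py val (normalize_fatura_py val)

-- ===== LEMMAS AND PROOFS =====

-- recursive characterisation of A's loop body
def pvGoA : List Char → Bool → List Char
  | [], _ => []
  | c :: cs, b =>
      let f := b || PySem.Chars.isdigit c
      (if f && c == 'O' then '0' else c) :: pvGoA cs f

theorem pvFoldA (l : List Char) (acc : List Char) (b : Bool) :
    (l.foldl (fun (st : List Char × Bool) ch =>
      let found := st.2 || PySem.Chars.isdigit ch
      (st.1 ++ [if found && ch == 'O' then '0' else ch], found)) (acc, b)).1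
      = acc ++ pvGoA l b := by
  induction l generalizing acc b with
  | nil => simp [pvGoA]
  | cons c cs ih =>
    simp only [List.foldl_cons, pvGoA]
    rw [ih]
    simp [List.append_assoc]

theorem pvGoA_true (l : List Char) :
    pvGoA l true = l.map (fun ch => if ch == 'O' then '0' else ch) := by
  induction l with
  | nil => rfl
  | cons c cs ih => simp [pvGoA, ih]

theorem pvDigit_ne_O (c : Char) (h : PySem.Chars.isdigit c = true) : (c == 'O') = false := by
  by_contra hc
  simp only [Bool.not_eq_false, beq_iff_eq] at hc
  subst hc
  exact absurd h (by decide)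

theorem pvGoA_false (l : List Char) :
    pvGoA l false =
      match l.findIdx? (fun ch => PySem.Chars.isdigit ch) with
      | none => l
      | some i => l.take i ++ (l.drop i).map (fun ch => if ch == 'O' then '0' else ch) := by
  induction l with
  | nil => rfl
  | cons c cs ih =>
    by_cases hd : PySem.Chars.isdigit c = true
    · have hO : c ≠ 'O' := by simpa using pvDigit_ne_O c hd
      simp [pvGoA, hd, List.findIdx?_cons, pvGoA_true, hO]
    · simp only [Bool.not_eq_true] at hd
      rw [show pvGoA (c :: cs) false = c :: pvGoA cs false from by simp [pvGoA, hd]]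
      rw [ih]
      simp only [List.findIdx?_cons, hd]
      cases h : cs.findIdx? (fun ch => PySem.Chars.isdigit ch) with
      | none => simp
      | some i => simp [List.take_succ_cons, List.drop_succ_cons]

-- ===== VERDICT (by name: the statement is the Claim_ definition above) =====
theorem normalize_fatura_py_spec : Claim_equal_normalize_fatura_py := by
  intro val _
  show normalize_fatura_py val = normalize_fatura_py_alt val
  simp only [normalize_fatura_py, normalize_fatura_py_alt, pvFoldA, List.nil_append, pvGoA_false]
  cases h : (PySem.Chars.upper val.toList).findIdx? (fun ch => PySem.Chars.isdigit ch) with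
  | none => rfl
  | some i =>
      simp [PySem.List.slice_to_natCast, PySem.List.slice_from_natCast]
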